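-- pv_equiv track=rewrite | github.com/mariakoren/algorithms-and-data-structures | lab01/zad01_2_.py | DYNAMICZNY
-- ===== SOURCE A (Python) =====
-- def DYNAMICZNY(n, M):
--     maks = 0
--     #  utworz tablicę kwadratową MM rozmiaru n
--     #  i wypełnij ją zerami
--     MM = [[0 for _ in range(n)] for _ in range(n)]
--     for y in range(0, n):
--         for x1 in range(0, n):
--             iloczyn = 1
--             for x2 in range(x1, n):
--                 iloczyn *= M[x2][y]
--                 MM[x1][x2] = iloczyn * (x2 - x1 + 1 + MM[x1][x2])
--                 if MM[x1][x2] > maks: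
--                     maks = MM[x1][x2]
--     return maks
-- ===== SOURCE B (Python) =====
-- def DYNAMICZNY(n, M):
--     # Direct enumeration from the closed form: A's MM[x1][x2] after processing
--     # column y equals (x2-x1+1) * sum over y1<=y of the product of the submatrix
--     # M[x1..x2][y1..y].  B evaluates that quantity from its definition for every
--     # triple (x1, x2, y2), recomputing the inner sum with a descending y1 loop;
--     # no DP value is carried between iterations.
--     best = 0
--     for x1 in range(n):
--         for x2 in range(x1, n):
--             h = x2 - x1 + 1
--             cp = []
--             for y in range(n):
--                 q = 1
--                 for x in range(x1, x2 + 1):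
--                     q *= M[x][y]
--                 cp.append(q)
--             for y2 in range(n):
--                 s = 0
--                 p = 1
--                 for y1 in reversed(range(y2 + 1)):
--                     p *= cp[y1]
--                     s += p
--                 v = h * s
--                 if v > best:
--                     best = v
--     return best
-- ===== Notes on version B (the rewrite author's own statement) =====
-- stated objective: alternative
-- what changed: A's dynamic programming over an n-by-n table MM is replaced by direct enumeration: B evaluates the closed form (x2-x1+1) * sum over y1<=y2 of the product of the submatrix M[x1..x2][y1..y2] from its definition for every triple (x1,x2,y2), recomputing each inner sum with a descending y1 loop over freshly built per-pair column products, so no DP value is carried between iterations.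
import Mathlib
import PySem

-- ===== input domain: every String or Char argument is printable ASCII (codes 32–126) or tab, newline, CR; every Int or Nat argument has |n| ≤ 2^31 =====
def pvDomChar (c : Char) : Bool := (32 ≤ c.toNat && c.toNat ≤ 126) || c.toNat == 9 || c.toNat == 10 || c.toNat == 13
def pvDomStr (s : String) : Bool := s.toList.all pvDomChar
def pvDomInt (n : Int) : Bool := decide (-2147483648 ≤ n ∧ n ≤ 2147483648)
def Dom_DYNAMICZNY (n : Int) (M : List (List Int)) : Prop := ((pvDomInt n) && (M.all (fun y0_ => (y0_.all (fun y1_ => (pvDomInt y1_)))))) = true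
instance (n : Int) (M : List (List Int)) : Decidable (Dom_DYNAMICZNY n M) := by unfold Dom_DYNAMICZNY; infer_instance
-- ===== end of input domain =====

-- B drops A's DP table entirely: it enumerates every triple (x1, x2, y2) and recomputes
-- the value (x2-x1+1) · Σ_{y1≤y2} Π M[x1..x2][y1..y2] from its definition by an inner
-- descending loop (alternative algorithm: direct enumeration instead of dynamic programming).

-- ===== PORT A =====
-- M[x][y]; pyGetD is Python's indexing on in-range indices, and Pre_DYNAMICZNY guarantees
-- every access performed by the loops is in range (x, y ∈ [0, n)).
def pvMel (M : List (List Int)) (x y : Nat) : Int :=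
  PySem.List.pyGetD (PySem.List.pyGetD M (x : Int) []) (y : Int) 0

-- the n×n zero table MM is modelled as a function Nat → Nat → Int; pointwise update = item assignment
def pvAstepX2 (M : List (List Int)) (y x1 : Nat)
    (s : Int × (Nat → Nat → Int) × Int) (x2 : Nat) : Int × (Nat → Nat → Int) × Int :=
  let il := s.1 * pvMel M x2 y
  let v := il * ((x2 : Int) - (x1 : Int) + 1 + s.2.1 x1 x2)
  (il, fun a b => if a = x1 ∧ b = x2 then v else s.2.1 a b, if v > s.2.2 then v else s.2.2)

def pvAloopX1 (M : List (List Int)) (N y : Nat)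
    (st : (Nat → Nat → Int) × Int) (x1 : Nat) : (Nat → Nat → Int) × Int :=
  let r := (List.range' x1 (N - x1)).foldl (pvAstepX2 M y x1) (1, st.1, st.2)
  (r.2.1, r.2.2)

def pvAloopY (M : List (List Int)) (N : Nat)
    (st : (Nat → Nat → Int) × Int) (y : Nat) : (Nat → Nat → Int) × Int :=
  (List.range N).foldl (pvAloopX1 M N y) st

def DYNAMICZNY (n : Int) (M : List (List Int)) : Int :=
  ((List.range n.toNat).foldl (pvAloopY M n.toNat) (fun _ _ => (0 : Int), (0 : Int))).2

-- ===== PORT B =====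
-- 'q = 1; for x in range(x1, x2+1): q *= M[x][y]'
def pvColProd (M : List (List Int)) (x1 x2 y : Nat) : Int :=
  (List.range' x1 (x2 + 1 - x1)).foldl (fun q x => q * pvMel M x y) 1

-- 'cp = []; for y in range(n): … cp.append(q)'
def pvBcp (M : List (List Int)) (N x1 x2 : Nat) : List Int :=
  (List.range N).foldl (fun cp y => cp ++ [pvColProd M x1 x2 y]) []

-- 'p *= cp[y1]; s += p'  (state (p, s); cp[y1] is Python indexing, in range here)
def pvBstepY1 (cp : List Int) (ps : Int × Int) (y1 : Nat) : Int × Int :=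
  let p := ps.1 * PySem.List.pyGetD cp (y1 : Int) 0
  (p, ps.2 + p)

-- 'for y1 in reversed(range(y2+1)): …; v = h*s; if v > best: best = v'
def pvBloopY2 (h : Int) (cp : List Int) (best : Int) (y2 : Nat) : Int :=
  let r := ((List.range (y2 + 1)).reverse).foldl (pvBstepY1 cp) (1, 0)
  let v := h * r.2
  if v > best then v else best

-- body of the x2 loop: build cp, then the y2 loop
def pvBpair (M : List (List Int)) (N x1 : Nat) (best : Int) (x2 : Nat) : Int :=
  (List.range N).foldl (pvBloopY2 ((x2 : Int) - (x1 : Int) + 1) (pvBcp M N x1 x2)) best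

def pvBloopX1 (M : List (List Int)) (N : Nat) (best : Int) (x1 : Nat) : Int :=
  (List.range' x1 (N - x1)).foldl (pvBpair M N x1) best

def DYNAMICZNY_alt (n : Int) (M : List (List Int)) : Int :=
  (List.range n.toNat).foldl (pvBloopX1 M n.toNat) 0

-- ===== PRECONDITION & SPEC =====
-- Pre_ excludes exactly the inputs on which Python A raises IndexError:
-- A reads M[x2][y] for all x2, y in [0, n), so M needs at least n rows each of length ≥ n.
def Pre_DYNAMICZNY (n : Int) (M : List (List Int)) : Prop :=
  n ≤ (M.length : Int) ∧ ∀ r ∈ M.take n.toNat, n ≤ (r.length : Int)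
instance (n : Int) (M : List (List Int)) : Decidable (Pre_DYNAMICZNY n M) := by
  unfold Pre_DYNAMICZNY; infer_instance

def pvWitness_DYNAMICZNY : Int × List (List Int) := (2, [[1, 2], [3, -4]])

def Spec_DYNAMICZNY (n : Int) (M : List (List Int)) (out : Int) : Prop := out = DYNAMICZNY_alt n M
instance (n : Int) (M : List (List Int)) (out : Int) : Decidable (Spec_DYNAMICZNY n M out) := by
  unfold Spec_DYNAMICZNY; infer_instance

-- ===== CLAIM (what is proved, stated in full; the proofs are below) =====
def Claim_equal_DYNAMICZNY : Prop := ∀ (n : Int) (M : List (List Int)),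
  Dom_DYNAMICZNY n M → Pre_DYNAMICZNY n M → Spec_DYNAMICZNY n M (DYNAMICZNY n M)

-- ===== LEMMAS AND PROOFS =====

-- product of M[x][y] over x ∈ [x1, j)
def pvQ (M : List (List Int)) (x1 j y : Nat) : Int :=
  ((List.range' x1 (j - x1)).map (fun x => pvMel M x y)).prod

-- the value MM[x1][x2] holds after k passes of A's y-loop
def pvV (M : List (List Int)) (x1 x2 : Nat) : Nat → Int
  | 0 => 0
  | k + 1 => pvQ M x1 (x2 + 1) k * ((x2 : Int) - (x1 : Int) + 1 + pvV M x1 x2 k)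

-- B's inner quantities: Π_{c=j}^{y2} Q c and Σ_{y1=0}^{y2} Π_{c=y1}^{y2} Q c
def pvP (Q : Nat → Int) (j y2 : Nat) : Int := ((List.range' j (y2 + 1 - j)).map Q).prod

def pvS (Q : Nat → Int) (y2 : Nat) : Int :=
  ((List.range' 0 (y2 + 1)).map (fun y1 => pvP Q y1 y2)).sum

lemma pvQ_self (M : List (List Int)) (x1 y : Nat) : pvQ M x1 x1 y = 1 := by
  simp [pvQ]

lemma pvQ_step (M : List (List Int)) (x1 j y : Nat) (h : x1 ≤ j) :
    pvQ M x1 (j + 1) y = pvQ M x1 j y * pvMel M j y := by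
  unfold pvQ
  rw [show j + 1 - x1 = (j - x1) + 1 by omega, List.range'_1_concat,
      show x1 + (j - x1) = j by omega]
  simp

lemma max_if (v mk : Int) : (if v > mk then v else mk) = max mk v := by
  rw [max_def]; split_ifs <;> omega

lemma pair_ext {A B : Type} {x x' : A} {y y' : B} (h1 : x = x') (h2 : y = y') :
    (x, y) = (x', y') := by subst h1; subst h2; rfl

lemma triple_ext {A B C : Type} {x x' : A} {y y' : B} {z z' : C}
    (h1 : x = x') (h2 : y = y') (h3 : z = z') : (x, y, z) = (x', y', z') := by
  subst h1; subst h2; subst h3; rfl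

-- A: the x2-loop
lemma A_x2 (M : List (List Int)) (y x1 : Nat) :
    ∀ (c : Nat), ∀ (j : Nat) (MM : Nat → Nat → Int) (mk : Int), x1 ≤ j →
    (List.range' j c).foldl (pvAstepX2 M y x1) (pvQ M x1 j y, MM, mk) =
      (pvQ M x1 (j + c) y,
       fun a b => if a = x1 ∧ j ≤ b ∧ b < j + c
         then pvQ M x1 (b + 1) y * ((b : Int) - (x1 : Int) + 1 + MM a b) else MM a b,
       List.foldl max mk ((List.range' j c).map
         (fun b => pvQ M x1 (b + 1) y * ((b : Int) - (x1 : Int) + 1 + MM x1 b)))) := by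
  intro c
  induction c with
  | zero =>
    intro j MM mk hj
    simp only [List.range'_zero, List.foldl_nil, List.map_nil, Nat.add_zero]
    refine triple_ext rfl ?_ rfl
    funext a b
    rw [if_neg]
    rintro ⟨-, h1, h2⟩; omega
  | succ c ih =>
    intro j MM mk hj
    rw [List.range'_succ, List.foldl_cons, List.map_cons, List.foldl_cons]
    show (List.range' (j+1) c).foldl (pvAstepX2 M y x1)
        (pvQ M x1 j y * pvMel M j y,
         fun a b => if a = x1 ∧ b = j
           then pvQ M x1 j y * pvMel M j y * ((j : Int) - (x1 : Int) + 1 + MM x1 j) else MM a b,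
         if pvQ M x1 j y * pvMel M j y * ((j : Int) - (x1 : Int) + 1 + MM x1 j) > mk
           then pvQ M x1 j y * pvMel M j y * ((j : Int) - (x1 : Int) + 1 + MM x1 j) else mk) = _
    rw [← pvQ_step M x1 j y hj]
    rw [ih (j + 1) _ _ (by omega)]
    refine triple_ext (by rw [show j + 1 + c = j + (c + 1) by omega]) ?_ ?_
    · funext a b
      by_cases h1 : a = x1
      · by_cases h2 : b = j
        · rw [if_neg (show ¬(a = x1 ∧ j + 1 ≤ b ∧ b < j + 1 + c) by rintro ⟨-, h, -⟩; omega),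
              if_pos (⟨h1, h2⟩ : a = x1 ∧ b = j),
              if_pos (show a = x1 ∧ j ≤ b ∧ b < j + (c + 1) from ⟨h1, by omega, by omega⟩),
              h1, h2]
        · rw [if_neg (show ¬(a = x1 ∧ b = j) from fun h => h2 h.2)]
          by_cases hC : j + 1 ≤ b ∧ b < j + 1 + c
          · rw [if_pos (⟨h1, hC.1, hC.2⟩ : a = x1 ∧ j + 1 ≤ b ∧ b < j + 1 + c),
                if_pos (show a = x1 ∧ j ≤ b ∧ b < j + (c + 1) from ⟨h1, by omega, by omega⟩)]
          · rw [if_neg (show ¬(a = x1 ∧ j + 1 ≤ b ∧ b < j + 1 + c) from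
                  fun h => hC ⟨h.2.1, h.2.2⟩),
                if_neg (show ¬(a = x1 ∧ j ≤ b ∧ b < j + (c + 1)) from
                  fun h => hC ⟨by omega, by omega⟩)]
      · rw [if_neg (show ¬(a = x1 ∧ j + 1 ≤ b ∧ b < j + 1 + c) from fun h => h1 h.1),
            if_neg (show ¬(a = x1 ∧ b = j) from fun h => h1 h.1),
            if_neg (show ¬(a = x1 ∧ j ≤ b ∧ b < j + (c + 1)) from fun h => h1 h.1)]
    · rw [max_if]
      have hlist : ∀ b', b' ∈ List.range' (j + 1) c →
          (pvQ M x1 (b' + 1) y * ((b' : Int) - (x1 : Int) + 1 +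
            if x1 = x1 ∧ b' = j then pvQ M x1 (j + 1) y * ((j : Int) - (x1 : Int) + 1 + MM x1 j)
            else MM x1 b')) =
          pvQ M x1 (b' + 1) y * ((b' : Int) - (x1 : Int) + 1 + MM x1 b') := by
        intro b' hb
        have hb' := List.mem_range'_1.mp hb
        rw [if_neg (show ¬(x1 = x1 ∧ b' = j) by rintro ⟨-, h⟩; omega)]
      rw [List.map_congr_left hlist]

-- A: the x1-loop
lemma A_x1 (M : List (List Int)) (N y : Nat) :
    ∀ (c : Nat), ∀ (j : Nat) (MM : Nat → Nat → Int) (mk : Int),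
    (List.range' j c).foldl (pvAloopX1 M N y) (MM, mk) =
      (fun a b => if j ≤ a ∧ a < j + c ∧ a ≤ b ∧ b < N
         then pvQ M a (b + 1) y * ((b : Int) - (a : Int) + 1 + MM a b) else MM a b,
       List.foldl max mk ((List.range' j c).flatMap (fun x1 => (List.range' x1 (N - x1)).map
         (fun x2 => pvQ M x1 (x2 + 1) y * ((x2 : Int) - (x1 : Int) + 1 + MM x1 x2))))) := by
  intro c
  induction c with
  | zero =>
    intro j MM mk
    simp only [List.range'_zero, List.foldl_nil, List.flatMap_nil, List.foldl_nil, Nat.add_zero]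
    refine pair_ext ?_ rfl
    funext a b
    rw [if_neg]
    rintro ⟨h1, h2, -, -⟩; omega
  | succ c ih =>
    intro j MM mk
    rw [List.range'_succ, List.foldl_cons, List.flatMap_cons, List.foldl_append]
    have hA2 := A_x2 M y j (N - j) j MM mk (le_refl j)
    rw [pvQ_self M j y] at hA2
    have hstep : pvAloopX1 M N y (MM, mk) j =
        ((fun a b => if a = j ∧ j ≤ b ∧ b < j + (N - j)
            then pvQ M j (b + 1) y * ((b : Int) - (j : Int) + 1 + MM a b) else MM a b),
         List.foldl max mk ((List.range' j (N - j)).map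
           (fun b => pvQ M j (b + 1) y * ((b : Int) - (j : Int) + 1 + MM j b)))) := by
      show (((List.range' j (N - j)).foldl (pvAstepX2 M y j) (1, MM, mk)).2.1,
            ((List.range' j (N - j)).foldl (pvAstepX2 M y j) (1, MM, mk)).2.2) = _
      rw [hA2]
    rw [hstep]
    rw [ih (j + 1) _ _]
    refine pair_ext ?_ ?_
    · funext a b
      by_cases h1 : a = j
      · rw [if_neg (show ¬(j + 1 ≤ a ∧ a < j + 1 + c ∧ a ≤ b ∧ b < N) by rintro ⟨h, -⟩; omega)]
        by_cases hb : j ≤ b ∧ b < N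
        · rw [if_pos (show a = j ∧ j ≤ b ∧ b < j + (N - j) from ⟨h1, hb.1, by omega⟩),
              if_pos (show j ≤ a ∧ a < j + (c + 1) ∧ a ≤ b ∧ b < N from
                ⟨by omega, by omega, by omega, hb.2⟩),
              h1]
        · rw [if_neg (show ¬(a = j ∧ j ≤ b ∧ b < j + (N - j)) from
                fun h => hb ⟨h.2.1, by omega⟩),
              if_neg (show ¬(j ≤ a ∧ a < j + (c + 1) ∧ a ≤ b ∧ b < N) from
                fun h => hb ⟨by omega, h.2.2.2⟩)]
      · rw [if_neg (show ¬(a = j ∧ j ≤ b ∧ b < j + (N - j)) from fun h => h1 h.1)]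
        by_cases hC : j + 1 ≤ a ∧ a < j + 1 + c ∧ a ≤ b ∧ b < N
        · rw [if_pos hC,
              if_pos (show j ≤ a ∧ a < j + (c + 1) ∧ a ≤ b ∧ b < N from
                ⟨by omega, by omega, hC.2.2.1, hC.2.2.2⟩)]
        · rw [if_neg hC,
              if_neg (show ¬(j ≤ a ∧ a < j + (c + 1) ∧ a ≤ b ∧ b < N) from
                fun hD => hC ⟨by omega, by omega, hD.2.2.1, hD.2.2.2⟩)]
    · have hlist : ∀ x1, x1 ∈ List.range' (j + 1) c →
          ((List.range' x1 (N - x1)).map (fun x2 => pvQ M x1 (x2 + 1) y *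
            ((x2 : Int) - (x1 : Int) + 1 +
              if x1 = j ∧ j ≤ x2 ∧ x2 < j + (N - j)
              then pvQ M j (x2 + 1) y * ((x2 : Int) - (j : Int) + 1 + MM x1 x2)
              else MM x1 x2))) =
          ((List.range' x1 (N - x1)).map (fun x2 => pvQ M x1 (x2 + 1) y *
            ((x2 : Int) - (x1 : Int) + 1 + MM x1 x2))) := by
        intro x1 hx1
        have hx1' := List.mem_range'_1.mp hx1
        apply List.map_congr_left
        intro x2 hx2
        rw [if_neg (show ¬(x1 = j ∧ j ≤ x2 ∧ x2 < j + (N - j)) by rintro ⟨rfl, -, -⟩; omega)]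
      congr 1
      apply congrArg List.flatten
      exact List.map_congr_left hlist

-- A: the y-loop
lemma A_y (M : List (List Int)) (N : Nat) :
    ∀ (c : Nat), ∀ (j : Nat) (MM : Nat → Nat → Int) (mk : Int),
    (∀ a b, a ≤ b → b < N → MM a b = pvV M a b j) →
    ((List.range' j c).foldl (pvAloopY M N) (MM, mk)).2 =
      List.foldl max mk ((List.range' j c).flatMap (fun y => (List.range' 0 N).flatMap
        (fun x1 => (List.range' x1 (N - x1)).map (fun x2 => pvV M x1 x2 (y + 1))))) := by
  intro c
  induction c with
  | zero =>
    intro j MM mk _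
    simp
  | succ c ih =>
    intro j MM mk hMM
    rw [List.range'_succ, List.foldl_cons, List.flatMap_cons, List.foldl_append]
    show ((List.range' (j+1) c).foldl (pvAloopY M N)
        ((List.range N).foldl (pvAloopX1 M N j) (MM, mk))).2 = _
    rw [List.range_eq_range']
    rw [A_x1 M N j N 0 MM mk]
    have e1 : (List.range' 0 N).flatMap (fun x1 => (List.range' x1 (N - x1)).map
          (fun x2 => pvQ M x1 (x2 + 1) j * ((x2 : Int) - (x1 : Int) + 1 + MM x1 x2))) =
        (List.range' 0 N).flatMap (fun x1 => (List.range' x1 (N - x1)).map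
          (fun x2 => pvV M x1 x2 (j + 1))) := by
      apply congrArg List.flatten
      apply List.map_congr_left
      intro x1 hx1
      have hx1' := List.mem_range'_1.mp hx1
      apply List.map_congr_left
      intro x2 hx2
      have hx2' := List.mem_range'_1.mp hx2
      rw [hMM x1 x2 (by omega) (by omega)]
      rfl
    rw [e1]
    rw [ih (j + 1) _ _
      (fun a b hab hbN => by
        show (if 0 ≤ a ∧ a < 0 + N ∧ a ≤ b ∧ b < N
            then pvQ M a (b + 1) j * ((b : Int) - (a : Int) + 1 + MM a b) else MM a b)
          = pvV M a b (j + 1)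
        rw [if_pos ⟨Nat.zero_le a, by omega, hab, hbN⟩, hMM a b hab hbN]
        rfl)]

-- ---------- B-side lemmas ----------

-- the running-product loop 'q = 1; for x: q *= f x' is the product of the map
lemma foldl_mul (f : Nat → Int) : ∀ (l : List Nat) (a : Int),
    l.foldl (fun q x => q * f x) a = a * (l.map f).prod := by
  intro l
  induction l with
  | nil => intro a; simp
  | cons x t ih => intro a; simp [ih, mul_assoc]

lemma colProd_eq (M : List (List Int)) (x1 x2 y : Nat) :
    pvColProd M x1 x2 y = pvQ M x1 (x2 + 1) y := by
  unfold pvColProd pvQ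
  rw [foldl_mul, one_mul]

lemma Bcp_eq (M : List (List Int)) (N x1 x2 : Nat) :
    pvBcp M N x1 x2 = (List.range N).map (pvColProd M x1 x2) := by
  unfold pvBcp
  rw [PySem.List.foldl_append_singleton_eq_map, List.nil_append]

-- extending the column-segment product downward: Π_{c=j}^{y2} = Q j · Π_{c=j+1}^{y2}
lemma pvP_bot (Q : Nat → Int) (j y2 : Nat) (h : j ≤ y2) :
    pvP Q j y2 = Q j * pvP Q (j + 1) y2 := by
  unfold pvP
  rw [show y2 + 1 - j = (y2 - j) + 1 by omega, List.range'_succ,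
      show y2 + 1 - (j + 1) = y2 - j by omega]
  simp

-- the step function with an abstract lookup; pvBstepY1 cp = pvBstepY1' (lookup in cp)
def pvBstepY1' (L : Nat → Int) (ps : Int × Int) (y1 : Nat) : Int × Int :=
  let p := ps.1 * L y1
  (p, ps.2 + p)

-- the descending y1-loop: invariant for processing y1 = j+c-1 down to j
lemma B_desc (L : Nat → Int) (y2 : Nat) :
    ∀ (c j : Nat), j + c = y2 + 1 → ∀ (s0 : Int),
    ((List.range' j c).reverse).foldl (pvBstepY1' L) (pvP L (j + c) y2, s0) =
      (pvP L j y2, s0 + ((List.range' j c).map (fun y1 => pvP L y1 y2)).sum) := by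
  intro c
  induction c with
  | zero =>
    intro j hj s0
    simp
  | succ c ih =>
    intro j hj s0
    rw [List.range'_succ, List.reverse_cons', List.concat_eq_append, List.foldl_append,
        List.foldl_cons, List.foldl_nil]
    have h1 : j + 1 + c = y2 + 1 := by omega
    rw [show j + (c + 1) = j + 1 + c by omega]
    rw [ih (j + 1) h1 s0]
    show (pvP L (j + 1) y2 * L j, s0 + _ + pvP L (j + 1) y2 * L j) = _
    rw [show pvP L (j + 1) y2 * L j = pvP L j y2 by
          rw [pvP_bot L j y2 (by omega)]; ring]
    refine pair_ext rfl ?_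
    rw [List.map_cons, List.sum_cons]
    ring

-- A's DP value = B's directly-evaluated quantity (the heart of the equivalence)
lemma V_eq_S (M : List (List Int)) (x1 x2 : Nat) : ∀ (k : Nat),
    pvV M x1 x2 (k + 1) =
      ((x2 : Int) - (x1 : Int) + 1) * pvS (fun c => pvQ M x1 (x2 + 1) c) k := by
  intro k
  induction k with
  | zero =>
    show pvQ M x1 (x2 + 1) 0 * ((x2 : Int) - (x1 : Int) + 1 + 0) = _
    unfold pvS pvP
    simp
    ring
  | succ k ih =>
    show pvQ M x1 (x2 + 1) (k + 1) * ((x2 : Int) - (x1 : Int) + 1 + pvV M x1 x2 (k + 1)) = _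
    rw [ih]
    set Q : Nat → Int := fun c => pvQ M x1 (x2 + 1) c with hQ
    have hS : pvS Q (k + 1) = Q (k + 1) * (1 + pvS Q k) := by
      unfold pvS
      rw [show (k + 1) + 1 = (k + 1) + 1 from rfl]
      rw [List.range'_1_concat, List.map_append, List.sum_append, Nat.zero_add]
      have hlast : pvP Q (k + 1) (k + 1) = Q (k + 1) := by
        unfold pvP
        rw [show (k + 1) + 1 - (k + 1) = 1 by omega]
        simp
      have hrest : (List.range' 0 (k + 1)).map (fun y1 => pvP Q y1 (k + 1)) =
          (List.range' 0 (k + 1)).map (fun y1 => pvP Q y1 k * Q (k + 1)) := by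
        apply List.map_congr_left
        intro y1 hy1
        have hy1' := List.mem_range'_1.mp hy1
        unfold pvP
        rw [show k + 1 + 1 - y1 = (k + 1 - y1) + 1 by omega, List.range'_1_concat,
            show y1 + (k + 1 - y1) = k + 1 by omega]
        simp
      rw [hrest]
      simp only [List.map_cons, List.map_nil, List.sum_cons, List.sum_nil, hlast]
      rw [List.sum_map_mul_right]
      ring
    rw [hS]
    ring

-- the 'if v > best' accumulation is a running max over the mapped values
lemma foldl_if_max (v : Nat → Int) : ∀ (l : List Nat) (b : Int),
    l.foldl (fun b y => if v y > b then v y else b) b = List.foldl max b (l.map v) := by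
  intro l
  induction l with
  | nil => intro b; simp
  | cons y t ih => intro b; rw [List.map_cons, List.foldl_cons, List.foldl_cons, max_if, ih]

-- a fold of per-element max-folds is one max-fold over the concatenation
lemma foldl_max_flat {β : Type} (g : Int → β → Int) (f : β → List Int)
    (hg : ∀ (b : Int) (x : β), g b x = List.foldl max b (f x)) :
    ∀ (l : List β) (b : Int), l.foldl g b = List.foldl max b (l.flatMap f) := by
  intro l
  induction l with
  | nil => intro b; simp
  | cons x t ih => intro b; rw [List.flatMap_cons, List.foldl_append, List.foldl_cons, hg, ih]

-- one (x1, x2) pair of B produces exactly A's values pvV M x1 x2 (y+1), y < N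
lemma B_pair (M : List (List Int)) (N x1 x2 : Nat) (best : Int) :
    pvBpair M N x1 best x2 =
      List.foldl max best ((List.range' 0 N).map (fun y => pvV M x1 x2 (y + 1))) := by
  unfold pvBpair
  set L : Nat → Int := fun y1 => PySem.List.pyGetD (pvBcp M N x1 x2) (y1 : Int) 0 with hL
  have hstep : pvBstepY1 (pvBcp M N x1 x2) = pvBstepY1' L := by
    funext ps y1
    rfl
  have hLval : ∀ y1, y1 < N → L y1 = pvQ M x1 (x2 + 1) y1 := by
    intro y1 hy1
    rw [hL]
    show PySem.List.pyGetD (pvBcp M N x1 x2) (y1 : Int) 0 = _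
    rw [Bcp_eq, PySem.List.pyGetD_natCast, PySem.List.getD_map_range _ _ _ _ hy1,
        colProd_eq]
  have hbody : ∀ (b : Int) (y2 : Nat), y2 < N →
      pvBloopY2 ((x2 : Int) - (x1 : Int) + 1) (pvBcp M N x1 x2) b y2 =
        (if pvV M x1 x2 (y2 + 1) > b then pvV M x1 x2 (y2 + 1) else b) := by
    intro b y2 hy2
    unfold pvBloopY2
    rw [hstep]
    have hfold := B_desc L y2 (y2 + 1) 0 (by omega) 0
    rw [← List.range_eq_range'] at hfold
    have hinit : pvP L (0 + (y2 + 1)) y2 = 1 := by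
      unfold pvP
      rw [show y2 + 1 - (0 + (y2 + 1)) = 0 by omega]
      simp
    rw [hinit] at hfold
    rw [hfold]
    have hSrw : ((List.range (y2 + 1)).map (fun y1 => pvP L y1 y2)).sum =
        pvS (fun c => pvQ M x1 (x2 + 1) c) y2 := by
      unfold pvS
      rw [List.range_eq_range']
      congr 1
      apply List.map_congr_left
      intro y1 hy1
      have hy1' := List.mem_range'_1.mp hy1
      unfold pvP
      congr 1
      apply List.map_congr_left
      intro c hc
      have hc' := List.mem_range'_1.mp hc
      exact hLval c (by omega)
    show (if ((x2 : Int) - (x1 : Int) + 1) * (0 + ((List.range (y2 + 1)).map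
          (fun y1 => pvP L y1 y2)).sum) > b
        then ((x2 : Int) - (x1 : Int) + 1) * (0 + ((List.range (y2 + 1)).map
          (fun y1 => pvP L y1 y2)).sum) else b) = _
    rw [zero_add, hSrw, ← V_eq_S M x1 x2 y2]
  rw [List.range_eq_range']
  rw [PySem.List.foldl_congr_mem (List.range' 0 N)
        (pvBloopY2 ((x2 : Int) - (x1 : Int) + 1) (pvBcp M N x1 x2))
        (fun b y2 => if pvV M x1 x2 (y2 + 1) > b then pvV M x1 x2 (y2 + 1) else b) best
        (fun b y2 hy2 => hbody b y2 (by have := List.mem_range'_1.mp hy2; omega))]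
  exact foldl_if_max (fun y => pvV M x1 x2 (y + 1)) (List.range' 0 N) best

-- B in normal form
lemma B_norm (M : List (List Int)) (N : Nat) :
    (List.range N).foldl (pvBloopX1 M N) 0 =
      List.foldl max 0 ((List.range' 0 N).flatMap (fun x1 =>
        (List.range' x1 (N - x1)).flatMap (fun x2 => (List.range' 0 N).map
          (fun y => pvV M x1 x2 (y + 1))))) := by
  rw [List.range_eq_range']
  apply foldl_max_flat
  intro b x1
  unfold pvBloopX1
  apply foldl_max_flat
  intro b' x2
  exact B_pair M N x1 x2 b'

-- permutation machinery for exchanging the outer two folds of a max-fold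
lemma key_perm {B C : Type} (h : B -> C) (g : B -> List C) : ∀ (l : List B),
    ((l.map h) ++ l.flatMap g).Perm (l.flatMap fun b => h b :: g b) := by
  intro l
  induction l with
  | nil => simp
  | cons b s ihs =>
    simp only [List.map_cons, List.flatMap_cons, List.cons_append]
    refine List.Perm.cons _ ?_
    exact (List.perm_append_comm_assoc _ _ _).trans (List.Perm.append_left (g b) ihs)

lemma swap_perm {A B C : Type} (f : A -> B -> C) : ∀ (l₁ : List A) (l₂ : List B),
    (l₁.flatMap fun a => l₂.map (f a)).Perm (l₂.flatMap fun b => l₁.map (fun a => f a b)) := by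
  intro l₁
  induction l₁ with
  | nil => intro l₂; simp
  | cons a t ih =>
    intro l₂
    simp only [List.flatMap_cons, List.map_cons]
    exact (List.Perm.append_left _ (ih l₂)).trans
      (key_perm (f a) (fun b => t.map (fun a => f a b)) l₂)

lemma foldmax_swap {A B : Type} (l₁ : List A) (l₂ : List B) (f : A -> B -> Int) (i : Int) :
    List.foldl max i (l₁.flatMap fun a => l₂.map (f a)) =
    List.foldl max i (l₂.flatMap fun b => l₁.map (fun a => f a b)) :=
  List.Perm.foldl_op_eq (swap_perm f l₁ l₂)

-- ===== VERDICT (by name: the statement is the Claim_ definition above) =====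
theorem DYNAMICZNY_spec : Claim_equal_DYNAMICZNY := by
  intro n M _ _
  show DYNAMICZNY n M = DYNAMICZNY_alt n M
  set N := n.toNat with hN
  have hA : DYNAMICZNY n M =
      List.foldl max 0 ((List.range' 0 N).flatMap (fun y => (List.range' 0 N).flatMap
        (fun x1 => (List.range' x1 (N - x1)).map (fun x2 => pvV M x1 x2 (y + 1))))) := by
    unfold DYNAMICZNY
    rw [List.range_eq_range']
    exact A_y M N N 0 (fun _ _ => 0) 0 (fun _ _ _ _ => rfl)
  have hB : DYNAMICZNY_alt n M =
      List.foldl max 0 ((List.range' 0 N).flatMap (fun x1 =>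
        (List.range' x1 (N - x1)).flatMap (fun x2 => (List.range' 0 N).map
          (fun y => pvV M x1 x2 (y + 1))))) := by
    unfold DYNAMICZNY_alt
    exact B_norm M N
  rw [hA, hB]
  have hLA : ((List.range' 0 N).flatMap (fun y => (List.range' 0 N).flatMap
        (fun x1 => (List.range' x1 (N - x1)).map (fun x2 => pvV M x1 x2 (y + 1))))) =
      ((List.range' 0 N).flatMap (fun y =>
        ((List.range' 0 N).flatMap (fun x1 => (List.range' x1 (N - x1)).map (Prod.mk x1))).map
          (fun p => pvV M p.1 p.2 (y + 1)))) := by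
    apply congrArg List.flatten
    apply List.map_congr_left
    intro y _
    rw [List.map_flatMap]
    apply congrArg List.flatten
    apply List.map_congr_left
    intro x1 _
    rw [List.map_map]
    rfl
  have hLB : ((List.range' 0 N).flatMap (fun x1 =>
        (List.range' x1 (N - x1)).flatMap (fun x2 => (List.range' 0 N).map
          (fun y => pvV M x1 x2 (y + 1))))) =
      (((List.range' 0 N).flatMap (fun x1 => (List.range' x1 (N - x1)).map (Prod.mk x1))).flatMap
        (fun p => (List.range' 0 N).map (fun y => pvV M p.1 p.2 (y + 1)))) := by
    rw [List.flatMap_assoc]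
    apply congrArg List.flatten
    apply List.map_congr_left
    intro x1 _
    rw [List.flatMap_map]
  rw [hLA, hLB]
  exact foldmax_swap (List.range' 0 N)
    ((List.range' 0 N).flatMap (fun x1 => (List.range' x1 (N - x1)).map (Prod.mk x1)))
    (fun y p => pvV M p.1 p.2 (y + 1)) 0
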